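-- pv_equiv track=rewrite | github.com/ertem0/ai_workload | src/analysis/trajectories.py | summarize_max_frequencies
-- ===== SOURCE A (Python) =====
-- def summarize_max_frequencies(
--     ngram_counts: dict[tuple[int, ...], int],
-- ) -> dict[int, int]:
--     max_frequency_by_length: dict[int, int] = {}
--
--     for sequence, count in ngram_counts.items():
--         if count < 2:
--             continue
--         length = len(sequence)
--         current_max = max_frequency_by_length.get(length, 0)
--         if count > current_max:
--             max_frequency_by_length[length] = count
--
--     return max_frequency_by_length
-- ===== SOURCE B (Python) =====
-- def summarize_max_frequencies(
--     ngram_counts: dict[tuple[int, ...], int],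
-- ) -> dict[int, int]:
--     # Pass 1: group all qualifying counts (>= 2) by ngram length.
--     counts_by_length: dict[int, list[int]] = {}
--     for sequence, count in ngram_counts.items():
--         if count >= 2:
--             counts_by_length.setdefault(len(sequence), []).append(count)
--     # Pass 2: reduce each group to its maximum.
--     return {length: max(counts) for length, counts in counts_by_length.items()}
-- ===== Notes on version B (the rewrite author's own statement) =====
-- stated objective: alternative
-- what changed: A keeps a single running max per length while scanning; B first groups all qualifying counts by length into lists, then a second reduction pass takes the max of each group.
import Mathlib
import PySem

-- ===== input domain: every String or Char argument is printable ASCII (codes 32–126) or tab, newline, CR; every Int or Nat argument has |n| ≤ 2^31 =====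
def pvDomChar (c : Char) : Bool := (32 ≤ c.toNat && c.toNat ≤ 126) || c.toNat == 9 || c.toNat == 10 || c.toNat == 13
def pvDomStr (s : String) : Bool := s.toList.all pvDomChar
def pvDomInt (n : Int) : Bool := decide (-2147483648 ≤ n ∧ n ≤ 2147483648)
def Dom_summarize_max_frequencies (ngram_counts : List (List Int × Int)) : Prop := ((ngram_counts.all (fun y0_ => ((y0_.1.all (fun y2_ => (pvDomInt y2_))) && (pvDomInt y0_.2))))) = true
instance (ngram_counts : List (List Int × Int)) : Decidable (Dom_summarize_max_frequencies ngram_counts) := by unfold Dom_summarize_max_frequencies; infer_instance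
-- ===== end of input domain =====

-- B replaces A's single running-max-per-length scan by a group-by-length pass followed
-- by a separate max-reduction pass over the groups (alternative decomposition, same cost).


-- ===== PORT A =====
def summarize_max_frequencies (ngram_counts : List (List Int × Int)) : List (Int × Int) :=
  (ngram_counts.foldl
    (fun d p =>
      if p.2 < 2 then d
      else
        let length : Int := p.1.length
        let current_max := d.getD length 0
        if p.2 > current_max then d.insert length p.2 else d)
    PySem.Dict.empty).items

-- ===== PORT B =====
-- max(counts) on a nonempty Python list
def pyMaxList : List Int → Int
  | [] => 0
  | c :: rest => rest.foldl max c

def summarize_max_frequencies_alt (ngram_counts : List (List Int × Int)) : List (Int × Int) :=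
  let counts_by_length :=
    ngram_counts.foldl
      (fun g p =>
        if p.2 ≥ 2 then g.modify ((p.1.length : Int)) [] (fun cs => cs ++ [p.2]) else g)
      PySem.Dict.empty
  counts_by_length.items.map (fun q => (q.1, pyMaxList q.2))

-- ===== PRECONDITION & SPEC =====
def Spec_summarize_max_frequencies (ngram_counts : List (List Int × Int)) (out : List (Int × Int)) : Prop := out = summarize_max_frequencies_alt ngram_counts
instance (ngram_counts : List (List Int × Int)) (out : List (Int × Int)) : Decidable (Spec_summarize_max_frequencies ngram_counts out) := by unfold Spec_summarize_max_frequencies; infer_instance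

-- ===== CLAIM (what is proved, stated in full; the proofs are below) =====
def Claim_equal_summarize_max_frequencies : Prop := ∀ (ngram_counts : List (List Int × Int)), Dom_summarize_max_frequencies ngram_counts → Spec_summarize_max_frequencies ngram_counts (summarize_max_frequencies ngram_counts)

-- ===== LEMMAS AND PROOFS =====

-- the A-side dictionary determined by the B-side grouping dictionary
def dOf (g : PySem.Dict Int (List Int)) : PySem.Dict Int Int :=
  PySem.Dict.mk (g.items.map (fun q => (q.1, pyMaxList q.2)))

theorem keys_dOf (g : PySem.Dict Int (List Int)) : (dOf g).keys = g.keys := by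
  simp [dOf, PySem.Dict.keys]

theorem contains_dOf (g : PySem.Dict Int (List Int)) (k : Int) :
    (dOf g).contains k = g.contains k := by
  rw [PySem.Dict.contains_eq_decide_mem_keys, PySem.Dict.contains_eq_decide_mem_keys, keys_dOf]

theorem pyMaxList_append (cs : List Int) (h : cs ≠ []) (c : Int) :
    pyMaxList (cs ++ [c]) = max (pyMaxList cs) c := by
  cases cs with
  | nil => exact absurd rfl h
  | cons a l => simp [pyMaxList, List.foldl_append]

theorem loop_eq (l : List (List Int × Int)) (g : PySem.Dict Int (List Int))
    (hnd : g.keys.Nodup) (hne : ∀ q ∈ g.items, q.2 ≠ []) :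
    l.foldl
      (fun d p =>
        if p.2 < 2 then d
        else
          let length : Int := p.1.length
          let current_max := d.getD length 0
          if p.2 > current_max then d.insert length p.2 else d)
      (dOf g)
    = dOf (l.foldl
        (fun g p =>
          if p.2 ≥ 2 then g.modify ((p.1.length : Int)) [] (fun cs => cs ++ [p.2]) else g)
        g) := by
  induction l generalizing g with
  | nil => rfl
  | cons p rest ih =>
    simp only [List.foldl_cons]
    by_cases hc : p.2 < 2
    · have h2 : ¬ (p.2 ≥ 2) := by omega
      simp only [if_pos hc, if_neg h2]
      exact ih g hnd hne
    · have h2 : p.2 ≥ 2 := by omega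
      simp only [if_neg hc, if_pos h2]
      set L : Int := (p.1.length : Int) with hL
      set g' := g.modify L [] (fun cs => cs ++ [p.2]) with hg'
      have hg'i : g' = g.insert L (g.getD L [] ++ [p.2]) := rfl
      have hnd' : g'.keys.Nodup := by
        rw [hg'i]; exact PySem.Dict.nodup_keys_insert g _ _ hnd
      have hne' : ∀ q ∈ g'.items, q.2 ≠ [] := by
        intro q hq
        rw [hg'i] at hq
        rcases (PySem.Dict.mem_items_insert _ _ _ _).1 hq with h | h
        · subst h; simp
        · exact hne q h.1
      have hstep :
          (if p.2 > (dOf g).getD L 0 then (dOf g).insert L p.2 else dOf g) = dOf g' := by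
        by_cases hct : g.contains L = true
        · -- L already grouped: B appends to the group, A maybe updates the max
          obtain ⟨cs, hcs⟩ : ∃ cs, g.get? L = some cs := by
            rcases h : g.get? L with _ | cs
            · rw [PySem.Dict.get?_eq_none_iff_contains] at h; rw [hct] at h; cases h
            · exact ⟨cs, rfl⟩
          have hmem : (L, cs) ∈ g.items := PySem.Dict.mem_items_of_get?_eq_some g hcs
          have hcsne : cs ≠ [] := hne _ hmem
          have hgetD : g.getD L [] = cs := PySem.Dict.getD_of_get?_eq_some g [] hcs
          have hmemd : (L, pyMaxList cs) ∈ (dOf g).items := by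
            simp only [dOf]
            exact List.mem_map.2 ⟨(L, cs), hmem, rfl⟩
          have hgd : (dOf g).getD L 0 = pyMaxList cs :=
            PySem.Dict.getD_of_mem_items _ hmemd (by rw [keys_dOf]; exact hnd) 0
          have hval : ∀ q ∈ g.items, q.1 = L → q.2 = cs := by
            intro q hq hqL
            have hq' : (q.1, q.2) ∈ g.items := by simpa using hq
            have := PySem.Dict.get?_of_mem_items g hq' hnd
            rw [hqL, hcs] at this
            exact (Option.some.inj this).symm
          have hctd : (dOf g).contains L = true := by rw [contains_dOf]; exact hct
          have hmax : pyMaxList (cs ++ [p.2]) = max (pyMaxList cs) p.2 :=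
            pyMaxList_append cs hcsne p.2
          have hitems : (dOf g').items =
              (g.items.map (fun q => if q.1 == L then (L, cs ++ [p.2]) else q)).map
                (fun q => (q.1, pyMaxList q.2)) := by
            simp only [dOf, hg'i, hgetD]
            rw [PySem.Dict.items_insert_of_contains g _ hct]
          rw [hgd]
          by_cases hgt : p.2 > pyMaxList cs
          · rw [if_pos hgt]
            apply PySem.Dict.ext
            rw [PySem.Dict.items_insert_of_contains (dOf g) p.2 hctd, hitems]
            simp only [dOf, List.map_map]
            apply List.map_congr_left
            intro q hq
            by_cases hqL : q.1 = L
            · have hq2 : q.2 = cs := hval q hq hqL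
              simp [Function.comp, hqL, hmax, max_eq_right hgt.le]
            · simp [Function.comp, hqL]
          · rw [if_neg hgt]
            apply PySem.Dict.ext
            rw [hitems]
            simp only [dOf, List.map_map]
            apply List.map_congr_left
            intro q hq
            by_cases hqL : q.1 = L
            · have hq2 : q.2 = cs := hval q hq hqL
              have hm : max (pyMaxList cs) p.2 = pyMaxList cs := max_eq_left (by omega)
              simp [Function.comp, hqL, hq2, hmax, hm]
            · simp [Function.comp, hqL]
        · -- first qualifying count at this length: both dictionaries append a fresh key
          have hctf : g.contains L = false := by
            cases h : g.contains L
            · rfl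
            · exact absurd h hct
          have hctdf : (dOf g).contains L = false := by rw [contains_dOf]; exact hctf
          have hgd : (dOf g).getD L 0 = 0 := PySem.Dict.getD_of_not_contains (dOf g) 0 hctdf
          have hgt : p.2 > (dOf g).getD L 0 := by rw [hgd]; omega
          rw [if_pos hgt]
          apply PySem.Dict.ext
          rw [PySem.Dict.items_insert_of_not_contains (dOf g) p.2 hctdf]
          simp only [dOf, hg'i, PySem.Dict.getD_of_not_contains g [] hctf,
            PySem.Dict.items_insert_of_not_contains g _ hctf, List.map_append]
          rfl
      rw [hstep]
      exact ih g' hnd' hne'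

-- ===== VERDICT (by name: the statement is the Claim_ definition above) =====
theorem summarize_max_frequencies_spec : Claim_equal_summarize_max_frequencies := by
  intro ngram_counts _
  show summarize_max_frequencies ngram_counts = summarize_max_frequencies_alt ngram_counts
  unfold summarize_max_frequencies summarize_max_frequencies_alt
  have h := loop_eq ngram_counts PySem.Dict.empty (by simp [PySem.Dict.keys_empty])
    (by intro q hq; simp [PySem.Dict.empty] at hq)
  have he : dOf PySem.Dict.empty = PySem.Dict.empty := rfl
  rw [he] at h
  rw [h]
  rfl
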